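-- pv_equiv track=rewrite | github.com/sanyaade-embedded-systems/TrafikantenLED | pyled/ledfont.py | widthOfLetter
-- ===== SOURCE A (Python) =====
-- def widthOfLetter(gfx):
--     width = 8
--     for col in [1, 0]:
--         for shifter in range(0, 8, 2):
--             occupied = False
--             for row in range(0, len(gfx)):
--                 if gfx[row][col] & (0b11 << shifter) != 0:
--                     return width
--                 else:
--                     occupied = True
--             width -= 1
--     return width
-- ===== SOURCE B (Python) =====
-- def widthOfLetter(gfx):
--     # Compute each row's own rendered width (widest-to-narrowest scan of its
--     # two column bytes) and return the maximum over the rows, default 0.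
--     def row_width(v1, v0):
--         for i in range(4):
--             if v1 & (0b11 << (2 * i)) != 0:
--                 return 8 - i
--         for i in range(4):
--             if v0 & (0b11 << (2 * i)) != 0:
--                 return 4 - i
--         return 0
--     best = 0
--     for r in gfx:
--         w = row_width(r[1], r[0])
--         if w > best:
--             best = w
--     return best
-- ===== Notes on version B (the rewrite author's own statement) =====
-- stated objective: alternative
-- what changed: A scans bit-pair positions widest-to-narrowest with an inner loop over all rows and an early return; B computes each row's own width and keeps a running maximum over the rows (equal because the position order is monotone in width).
-- outside the precondition, e.g. on widthOfLetter([[0, 3], [5]]): A returns 8, B raises IndexError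
import Mathlib
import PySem

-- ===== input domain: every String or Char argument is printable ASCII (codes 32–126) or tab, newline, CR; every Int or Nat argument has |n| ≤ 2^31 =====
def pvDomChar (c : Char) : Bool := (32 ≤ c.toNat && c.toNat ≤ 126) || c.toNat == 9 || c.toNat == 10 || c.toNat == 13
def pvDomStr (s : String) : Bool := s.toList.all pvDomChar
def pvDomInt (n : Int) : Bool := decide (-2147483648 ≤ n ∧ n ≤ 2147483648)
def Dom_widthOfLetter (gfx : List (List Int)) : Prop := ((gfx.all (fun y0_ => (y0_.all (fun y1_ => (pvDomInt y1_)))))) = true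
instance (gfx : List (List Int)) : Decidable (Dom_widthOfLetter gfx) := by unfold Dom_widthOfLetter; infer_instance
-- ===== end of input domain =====

-- B replaces A's position-outer/row-inner scan with a per-row width plus a running maximum (alternative decomposition, same cost).

-- ===== PORT A =====
-- inner 'for row in range(0, len(gfx))' loop: none = IndexError,
-- some (some w) = early 'return width', some none = loop fell through
def wolRowLoop (gfx : List (List Int)) (col mask width : Int) : List Int → Option (Option Int)
  | [] => some none
  | row :: rest =>
    match PySem.List.pyGet? gfx row with
    | none => none
    | some r =>
      match PySem.List.pyGet? r col with
      | none => none
      | some v =>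
        if PySem.Int.band v mask ≠ 0 then some (some width)
        else wolRowLoop gfx col mask width rest

-- 'for shifter in range(0, 8, 2)': Sum.inl w = early return, Sum.inr width = done
-- (shifter is a nonnegative literal, so '0b11 << shifter' is '3 <<< shifter.toNat' exactly)
def wolShiftLoop (gfx : List (List Int)) (col : Int) : Int → List Int → Option (Int ⊕ Int)
  | width, [] => some (Sum.inr width)
  | width, shifter :: rest =>
    match wolRowLoop gfx col ((3 : Int) <<< shifter.toNat) width
        (PySem.List.pyRange 0 (PySem.List.len gfx) 1) with
    | none => none
    | some (some w) => some (Sum.inl w)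
    | some none => wolShiftLoop gfx col (width - 1) rest

-- 'for col in [1, 0]'
def wolColLoop (gfx : List (List Int)) : Int → List Int → Option Int
  | width, [] => some width
  | width, col :: rest =>
    match wolShiftLoop gfx col width (PySem.List.pyRange 0 8 2) with
    | none => none
    | some (Sum.inl w) => some w
    | some (Sum.inr w') => wolColLoop gfx w' rest

def widthOfLetter (gfx : List (List Int)) : Int :=
  (wolColLoop gfx 8 [1, 0]).getD 0   -- none = IndexError, excluded by Pre_

-- ===== PORT B =====
-- one 'for i in range(4)' scan of row_width: some (base - i) = early return
def wolAltScan (v base : Int) : List Int → Option Int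
  | [] => none
  | i :: rest =>
    if PySem.Int.band v ((3 : Int) <<< (2 * i).toNat) ≠ 0 then some (base - i)
    else wolAltScan v base rest

def wolAltRowWidth (v1 v0 : Int) : Int :=
  match wolAltScan v1 8 (PySem.List.pyRange 0 4 1) with
  | some w => w
  | none =>
    match wolAltScan v0 4 (PySem.List.pyRange 0 4 1) with
    | some w => w
    | none => 0

-- 'for r in gfx': none = IndexError on r[1] / r[0]
def wolAltLoop : List (List Int) → Int → Option Int
  | [], best => some best
  | r :: rest, best =>
    match PySem.List.pyGet? r 1 with
    | none => none
    | some v1 =>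
      match PySem.List.pyGet? r 0 with
      | none => none
      | some v0 =>
        let w := wolAltRowWidth v1 v0
        wolAltLoop rest (if w > best then w else best)

def widthOfLetter_alt (gfx : List (List Int)) : Int :=
  (wolAltLoop gfx 0).getD 0   -- none = IndexError, excluded by Pre_

-- ===== PRECONDITION & SPEC =====
-- Pre_ excludes gfx containing a row with fewer than 2 entries: there A raises
-- IndexError (unless an earlier row already triggered the early return, where A
-- returns but B raises IndexError on that short row).
def Pre_widthOfLetter (gfx : List (List Int)) : Prop := ∀ r ∈ gfx, 2 ≤ r.length
instance (gfx : List (List Int)) : Decidable (Pre_widthOfLetter gfx) := by unfold Pre_widthOfLetter; infer_instance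

def pvWitness_widthOfLetter : List (List Int) := [[1, 2], [0, 0]]

def Spec_widthOfLetter (gfx : List (List Int)) (out : Int) : Prop := out = widthOfLetter_alt gfx
instance (gfx : List (List Int)) (out : Int) : Decidable (Spec_widthOfLetter gfx out) := by unfold Spec_widthOfLetter; infer_instance

-- ===== CLAIM (what is proved, stated in full; the proofs are below) =====
def Claim_equal_widthOfLetter : Prop := ∀ (gfx : List (List Int)), Dom_widthOfLetter gfx → Pre_widthOfLetter gfx → Spec_widthOfLetter gfx (widthOfLetter gfx)

-- ===== LEMMAS AND PROOFS =====

-- the test 'gfx[row][col] & mask != 0' on a row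
def pvHit (col mask : Int) (r : List Int) : Bool :=
  PySem.Int.band (PySem.List.pyGetD r col 0) mask != 0

-- an if-chain over (test, width) pairs evaluated on one row …
def pvChainO {α : Type} (r : α) : List ((α → Bool) × Int) → Int
  | [] => 0
  | q :: ps => if q.1 r then q.2 else pvChainO r ps

-- … and evaluated existentially over all rows
def pvChainA {α : Type} (l : List α) : List ((α → Bool) × Int) → Int
  | [] => 0
  | q :: ps => if l.any q.1 then q.2 else pvChainA l ps

-- the 8 bit-pair positions, widest first
def pvPs : List ((List Int → Bool) × Int) :=
  [(pvHit 1 3, 8), (pvHit 1 12, 7), (pvHit 1 48, 6), (pvHit 1 192, 5),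
   (pvHit 0 3, 4), (pvHit 0 12, 3), (pvHit 0 48, 2), (pvHit 0 192, 1)]

theorem pvChainO_le {α : Type} (r : α) (ps : List ((α → Bool) × Int)) (c : Int)
    (hc : 0 ≤ c) (h : ∀ q ∈ ps, q.2 ≤ c) : pvChainO r ps ≤ c := by
  induction ps with
  | nil => simpa [pvChainO]
  | cons q ps ih =>
    simp only [pvChainO]
    split
    · exact h q (List.mem_cons_self ..)
    · exact ih fun q hq => h q (List.mem_cons_of_mem _ hq)

theorem pvChainA_le {α : Type} (l : List α) (ps : List ((α → Bool) × Int)) (c : Int)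
    (hc : 0 ≤ c) (h : ∀ q ∈ ps, q.2 ≤ c) : pvChainA l ps ≤ c := by
  induction ps with
  | nil => simpa [pvChainA]
  | cons q ps ih =>
    simp only [pvChainA]
    split
    · exact h q (List.mem_cons_self ..)
    · exact ih fun q hq => h q (List.mem_cons_of_mem _ hq)

-- the monotonicity argument: widest-first over (r :: rs) is the max of
-- row r's chain and the chain over rs
theorem pvChainA_cons {α : Type} (r : α) (rs : List α) (ps : List ((α → Bool) × Int))
    (hnn : ∀ q ∈ ps, 0 ≤ q.2)
    (hdec : List.Pairwise (fun a b => b.2 ≤ a.2) ps) :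
    pvChainA (r :: rs) ps = max (pvChainO r ps) (pvChainA rs ps) := by
  induction ps with
  | nil => simp [pvChainA, pvChainO]
  | cons q ps ih =>
    have hq2 : 0 ≤ q.2 := hnn q (List.mem_cons_self ..)
    have hbd : ∀ p ∈ ps, p.2 ≤ q.2 := fun p hp => (List.pairwise_cons.mp hdec).1 p hp
    have hnn' : ∀ p ∈ ps, 0 ≤ p.2 := fun p hp => hnn p (List.mem_cons_of_mem _ hp)
    have hdec' := (List.pairwise_cons.mp hdec).2
    simp only [pvChainA, pvChainO, List.any_cons]
    by_cases hr : q.1 r = true <;> by_cases hrs : rs.any q.1 = true <;>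
      simp only [hr, hrs, Bool.true_or, Bool.false_or, if_true, Bool.or_self]
    · have := pvChainA_le rs ps q.2 hq2 hbd
      omega
    · have := pvChainA_le rs ps q.2 hq2 hbd
      omega
    · have := pvChainO_le r ps q.2 hq2 hbd
      omega
    · exact ih hnn' hdec'

-- chain values are nonnegative
theorem pvChainO_nonneg {α : Type} (r : α) (ps : List ((α → Bool) × Int))
    (hnn : ∀ q ∈ ps, 0 ≤ q.2) : 0 ≤ pvChainO r ps := by
  induction ps with
  | nil => simp [pvChainO]
  | cons q ps ih =>
    simp only [pvChainO]
    split
    · exact hnn q (List.mem_cons_self ..)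
    · exact ih fun q hq => hnn q (List.mem_cons_of_mem _ hq)

theorem pvChainA_nonneg {α : Type} (l : List α) (ps : List ((α → Bool) × Int))
    (hnn : ∀ q ∈ ps, 0 ≤ q.2) : 0 ≤ pvChainA l ps := by
  induction ps with
  | nil => simp [pvChainA]
  | cons q ps ih =>
    simp only [pvChainA]
    split
    · exact hnn q (List.mem_cons_self ..)
    · exact ih fun q hq => hnn q (List.mem_cons_of_mem _ hq)

theorem pvChainA_nil {α : Type} (ps : List ((α → Bool) × Int)) :
    pvChainA ([] : List α) ps = 0 := by
  induction ps with
  | nil => simp [pvChainA]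
  | cons q ps ih => simpa [pvChainA] using ih

-- B's running maximum computes the chain over all rows
theorem pvFoldMax {α : Type} (rs : List α) (ps : List ((α → Bool) × Int))
    (hnn : ∀ q ∈ ps, 0 ≤ q.2)
    (hdec : List.Pairwise (fun a b => b.2 ≤ a.2) ps) :
    ∀ b : Int, 0 ≤ b →
      rs.foldl (fun b r => if pvChainO r ps > b then pvChainO r ps else b) b
        = max b (pvChainA rs ps) := by
  induction rs with
  | nil =>
    intro b hb
    rw [List.foldl_nil, pvChainA_nil]
    omega
  | cons r rs ih =>
    intro b hb
    have h0 : 0 ≤ pvChainO r ps := pvChainO_nonneg r ps hnn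
    rw [List.foldl_cons, ih _ (by omega), pvChainA_cons r rs ps hnn hdec]
    split_ifs <;> omega

-- A's inner row loop over valid indices returns early iff some listed row hits
theorem wolRowLoop_eq (gfx : List (List Int)) (col mask width : Int)
    (hcol : col = 0 ∨ col = 1) (hpre : Pre_widthOfLetter gfx)
    (idxs : List Int) (hidx : ∀ i ∈ idxs, 0 ≤ i ∧ i < (gfx.length : Int)) :
    wolRowLoop gfx col mask width idxs
      = some (if idxs.any (fun i => pvHit col mask (PySem.List.pyGetD gfx i [])) then some width
              else none) := by
  induction idxs with
  | nil => simp [wolRowLoop]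
  | cons i rest ih =>
    obtain ⟨hi0, hilt⟩ := hidx i (List.mem_cons_self ..)
    have hget : PySem.List.pyGet? gfx i = some (gfx[i.toNat]'(by omega)) :=
      PySem.List.pyGet?_eq_some_getElem _ hi0 hilt
    have hgetD : PySem.List.pyGetD gfx i [] = gfx[i.toNat]'(by omega) :=
      PySem.List.pyGetD_eq_getElem _ _ hi0 hilt
    have hrlen : 2 ≤ (gfx[i.toNat]'(by omega)).length := hpre _ (List.getElem_mem _)
    have hc0 : (0:Int) ≤ col := by rcases hcol with h | h <;> omega
    have hclt : col < ((gfx[i.toNat]'(by omega)).length : Int) := by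
      rcases hcol with h | h <;> omega
    have hcget : PySem.List.pyGet? (gfx[i.toNat]'(by omega)) col
        = some ((gfx[i.toNat]'(by omega))[col.toNat]'(by omega)) :=
      PySem.List.pyGet?_eq_some_getElem _ hc0 hclt
    have hcgetD : PySem.List.pyGetD (gfx[i.toNat]'(by omega)) col 0
        = (gfx[i.toNat]'(by omega))[col.toNat]'(by omega) :=
      PySem.List.pyGetD_eq_getElem _ _ hc0 hclt
    have ih' := ih fun j hj => hidx j (List.mem_cons_of_mem _ hj)
    simp only [wolRowLoop, hget, hcget, List.any_cons, pvHit, hgetD, hcgetD]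
    by_cases hb : PySem.Int.band ((gfx[i.toNat]'(by omega))[col.toNat]'(by omega)) mask ≠ 0
    · simp [hb]
    · simp only [if_neg hb, ih', pvHit]
      simp at hb
      simp [hb]

-- … and over range(0, len(gfx)) that is: some row of gfx hits
theorem wolRowLoop_any (gfx : List (List Int)) (col mask width : Int)
    (hcol : col = 0 ∨ col = 1) (hpre : Pre_widthOfLetter gfx) :
    wolRowLoop gfx col mask width (PySem.List.pyRange 0 (PySem.List.len gfx) 1)
      = some (if gfx.any (pvHit col mask) then some width else none) := by
  rw [wolRowLoop_eq gfx col mask width hcol hpre _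
      (fun i hi => by
        rw [PySem.List.mem_pyRange_one] at hi
        simpa [PySem.List.len_eq] using hi)]
  have : (PySem.List.pyRange 0 (PySem.List.len gfx) 1).any
      (fun i => pvHit col mask (PySem.List.pyGetD gfx i []))
      = gfx.any (pvHit col mask) := by
    conv_rhs => rw [← PySem.List.map_pyGetD_pyRange_zero gfx []]
    rw [List.any_map]
    rfl
  rw [this]

-- shift-literal masks
theorem pvMskA0 : ((3:Int) <<< ((0:Int)).toNat) = 3 := by decide
theorem pvMskA2 : ((3:Int) <<< ((2:Int)).toNat) = 12 := by decide
theorem pvMskA4 : ((3:Int) <<< ((4:Int)).toNat) = 48 := by decide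
theorem pvMskA6 : ((3:Int) <<< ((6:Int)).toNat) = 192 := by decide
theorem pvMskB0 : ((3:Int) <<< ((2 * (0:Int))).toNat) = 3 := by decide
theorem pvMskB1 : ((3:Int) <<< ((2 * (1:Int))).toNat) = 12 := by decide
theorem pvMskB2 : ((3:Int) <<< ((2 * (2:Int))).toNat) = 48 := by decide
theorem pvMskB3 : ((3:Int) <<< ((2 * (3:Int))).toNat) = 192 := by decide

-- A equals the widest-first chain over all rows
theorem widthOfLetter_eq_chain (gfx : List (List Int)) (hpre : Pre_widthOfLetter gfx) :
    widthOfLetter gfx = pvChainA gfx pvPs := by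
  have e1 := wolRowLoop_any gfx 1 3 8 (Or.inr rfl) hpre
  have e2 := wolRowLoop_any gfx 1 12 7 (Or.inr rfl) hpre
  have e3 := wolRowLoop_any gfx 1 48 6 (Or.inr rfl) hpre
  have e4 := wolRowLoop_any gfx 1 192 5 (Or.inr rfl) hpre
  have e5 := wolRowLoop_any gfx 0 3 4 (Or.inl rfl) hpre
  have e6 := wolRowLoop_any gfx 0 12 3 (Or.inl rfl) hpre
  have e7 := wolRowLoop_any gfx 0 48 2 (Or.inl rfl) hpre
  have e8 := wolRowLoop_any gfx 0 192 1 (Or.inl rfl) hpre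
  have hrange8 : PySem.List.pyRange 0 8 2 = [0, 2, 4, 6] := by decide
  simp only [PySem.List.len_eq] at e1 e2 e3 e4 e5 e6 e7 e8
  by_cases h1 : gfx.any (pvHit 1 3) = true
  · norm_num [widthOfLetter, wolColLoop, hrange8, wolShiftLoop, pvMskA0, e1, h1, pvChainA, pvPs]
  by_cases h2 : gfx.any (pvHit 1 12) = true
  · norm_num [widthOfLetter, wolColLoop, hrange8, wolShiftLoop, pvMskA0, pvMskA2,
      e1, e2, h1, h2, pvChainA, pvPs]
  by_cases h3 : gfx.any (pvHit 1 48) = true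
  · norm_num [widthOfLetter, wolColLoop, hrange8, wolShiftLoop, pvMskA0, pvMskA2, pvMskA4,
      e1, e2, e3, h1, h2, h3, pvChainA, pvPs]
  by_cases h4 : gfx.any (pvHit 1 192) = true
  · norm_num [widthOfLetter, wolColLoop, hrange8, wolShiftLoop, pvMskA0, pvMskA2, pvMskA4,
      pvMskA6, e1, e2, e3, e4, h1, h2, h3, h4, pvChainA, pvPs]
  by_cases h5 : gfx.any (pvHit 0 3) = true
  · norm_num [widthOfLetter, wolColLoop, hrange8, wolShiftLoop, pvMskA0, pvMskA2, pvMskA4,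
      pvMskA6, e1, e2, e3, e4, e5, h1, h2, h3, h4, h5, pvChainA, pvPs]
  by_cases h6 : gfx.any (pvHit 0 12) = true
  · norm_num [widthOfLetter, wolColLoop, hrange8, wolShiftLoop, pvMskA0, pvMskA2, pvMskA4,
      pvMskA6, e1, e2, e3, e4, e5, e6, h1, h2, h3, h4, h5, h6, pvChainA, pvPs]
  by_cases h7 : gfx.any (pvHit 0 48) = true
  · norm_num [widthOfLetter, wolColLoop, hrange8, wolShiftLoop, pvMskA0, pvMskA2, pvMskA4,
      pvMskA6, e1, e2, e3, e4, e5, e6, e7, h1, h2, h3, h4, h5, h6, h7, pvChainA, pvPs]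
  by_cases h8 : gfx.any (pvHit 0 192) = true
  · norm_num [widthOfLetter, wolColLoop, hrange8, wolShiftLoop, pvMskA0, pvMskA2, pvMskA4,
      pvMskA6, e1, e2, e3, e4, e5, e6, e7, e8, h1, h2, h3, h4, h5, h6, h7, h8, pvChainA, pvPs]
  · norm_num [widthOfLetter, wolColLoop, hrange8, wolShiftLoop, pvMskA0, pvMskA2, pvMskA4,
      pvMskA6, e1, e2, e3, e4, e5, e6, e7, e8, h1, h2, h3, h4, h5, h6, h7, h8, pvChainA, pvPs]

-- B's row width is the chain of one row
theorem wolAltRowWidth_eq (r : List Int) :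
    wolAltRowWidth (PySem.List.pyGetD r 1 0) (PySem.List.pyGetD r 0 0) = pvChainO r pvPs := by
  have hrange4 : PySem.List.pyRange 0 4 1 = [0, 1, 2, 3] := by decide
  unfold wolAltRowWidth
  rw [hrange4]
  simp only [wolAltScan, pvMskB0, pvMskB1, pvMskB2, pvMskB3, pvChainO, pvPs, pvHit, bne_iff_ne]
  split_ifs <;> simp_all

-- B's loop is the running-maximum fold (Option-threaded under Pre_)
theorem wolAltLoop_eq (gfx : List (List Int)) (hpre : Pre_widthOfLetter gfx) :
    ∀ b : Int, wolAltLoop gfx b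
      = some (gfx.foldl (fun b r => if pvChainO r pvPs > b then pvChainO r pvPs else b) b) := by
  induction gfx with
  | nil => intro b; simp [wolAltLoop]
  | cons r rest ih =>
    intro b
    have hlen : 2 ≤ r.length := hpre r (List.mem_cons_self ..)
    have h1 : PySem.List.pyGet? r 1 = some (PySem.List.pyGetD r 1 0) := by
      rw [PySem.List.pyGet?_eq_some_getElem _ (by omega) (by exact_mod_cast by omega),
          PySem.List.pyGetD_eq_getElem _ _ (by omega) (by exact_mod_cast by omega)]
    have h0 : PySem.List.pyGet? r 0 = some (PySem.List.pyGetD r 0 0) := by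
      rw [PySem.List.pyGet?_eq_some_getElem _ (by omega) (by exact_mod_cast by omega),
          PySem.List.pyGetD_eq_getElem _ _ (by omega) (by exact_mod_cast by omega)]
    have ih' := ih fun q hq => hpre q (List.mem_cons_of_mem _ hq)
    simp only [wolAltLoop, h1, h0, wolAltRowWidth_eq, ih', List.foldl_cons]

theorem pvPs_nonneg : ∀ q ∈ pvPs, (0:Int) ≤ q.2 := by decide
theorem pvPs_dec : List.Pairwise (fun a b => b.2 ≤ a.2) pvPs := by
  unfold pvPs
  norm_num

-- ===== VERDICT (by name: the statement is the Claim_ definition above) =====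
theorem widthOfLetter_spec : Claim_equal_widthOfLetter := by
  intro gfx _ hpre
  unfold Spec_widthOfLetter widthOfLetter_alt
  rw [wolAltLoop_eq gfx hpre, Option.getD_some,
      pvFoldMax gfx pvPs pvPs_nonneg pvPs_dec 0 le_rfl,
      widthOfLetter_eq_chain gfx hpre]
  have := pvChainA_nonneg gfx pvPs pvPs_nonneg
  omega
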